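-- pv_equiv track=rewrite | github.com/janakuz/gr | gen.py | check_sent
-- ===== SOURCE A (Python) =====
-- def find_w(w, grt):
--     res = []
--     for nt in grt:
--         if w in grt[nt]:
--             res.append(nt)
--     return res
--
-- def check_sent(sent, grnt, grt):
--     temp_gr = grnt[:]
--     temp_gr2 = grnt[:]
--     i = 0
--     while temp_gr != [] and i < len(sent):
--         word = sent[i]
--         start = find_w(word, grt)
--         for s in temp_gr:
--             if i < len(s) and s[i] not in start:
--                 temp_gr2.remove(s)
--         temp_gr = temp_gr2[:]
--         i += 1
--     if temp_gr != [] and i == len(sent):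
--         return True
--     return False
-- ===== SOURCE B (Python) =====
-- def check_sent(sent, grnt, grt):
--     # s[i] in find_w(w, grt)  <=>  s[i] in grt and w in grt[s[i]]  (direct lookup, no grammar scan)
--     cands = grnt
--     for i, w in enumerate(sent):
--         cands = [s for s in cands if len(s) <= i or (s[i] in grt and w in grt[s[i]])]
--         if not cands:
--             return False
--     return bool(cands)
-- ===== Notes on version B (the rewrite author's own statement) =====
-- stated objective: simpler
-- what changed: Drops the find_w helper (a scan of every grammar entry per word) and the copy-and-list.remove candidate loop; instead one early-exiting filter pass tests each candidate symbol with two direct dict lookups (s[i] in grt and w in grt[s[i]]).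
import Mathlib
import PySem

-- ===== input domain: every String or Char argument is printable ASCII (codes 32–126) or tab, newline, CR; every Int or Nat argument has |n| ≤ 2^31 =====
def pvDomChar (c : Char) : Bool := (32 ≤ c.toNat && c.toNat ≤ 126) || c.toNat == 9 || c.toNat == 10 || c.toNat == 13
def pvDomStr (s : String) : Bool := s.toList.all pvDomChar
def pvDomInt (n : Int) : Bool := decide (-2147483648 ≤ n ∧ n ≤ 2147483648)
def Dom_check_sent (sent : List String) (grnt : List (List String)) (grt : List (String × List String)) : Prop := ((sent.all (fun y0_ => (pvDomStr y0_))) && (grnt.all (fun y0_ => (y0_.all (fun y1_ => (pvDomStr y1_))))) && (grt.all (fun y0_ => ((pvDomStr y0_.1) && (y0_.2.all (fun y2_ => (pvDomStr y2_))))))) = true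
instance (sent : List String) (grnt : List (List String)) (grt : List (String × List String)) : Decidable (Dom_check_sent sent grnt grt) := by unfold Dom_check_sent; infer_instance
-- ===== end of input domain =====

-- B replaces A's per-word find_w scan of the whole grammar and its copy-and-remove candidate loop
-- by one early-exiting filter pass using direct dict lookups; return value is identical.

-- ===== PORT A =====

-- grt[nt] (first-match association lookup; for the encoding of a Python dict the key is present
-- exactly once, so this is the value of nt's pair and the KeyError case is unreachable here)
def pvLookup (grt : List (String × List String)) (nt : String) : List String :=
  ((grt.find? (fun q => q.1 == nt)).map Prod.snd).getD []

-- find_w(w, grt): for nt in grt: if w in grt[nt]: res.append(nt)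
def find_w (w : String) (grt : List (String × List String)) : List String :=
  grt.foldl (fun res p => if w ∈ pvLookup grt p.1 then res ++ [p.1] else res) []

-- the while loop of check_sent; at the start of each iteration temp_gr2 == temp_gr (Python copies
-- it back with temp_gr = temp_gr2[:]), so the fold starts from tg.  temp_gr2.remove(s) is
-- PySem.List.remove?; s ∈ temp_gr2 always holds there, so the ValueError branch is unreachable
-- and .getD keeps it total.
def csLoop (sent : List String) (grt : List (String × List String))
    (tg : List (List String)) (i : Nat) : List (List String) × Nat :=
  if _h : tg ≠ [] ∧ i < sent.length then
    let word := sent.getD i ""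
    let start := find_w word grt
    let tg2 := tg.foldl (fun acc s =>
      if i < s.length ∧ s.getD i "" ∉ start then (PySem.List.remove? acc s).getD acc else acc) tg
    csLoop sent grt tg2 (i + 1)
  else (tg, i)
termination_by sent.length - i
decreasing_by omega

def check_sent (sent : List String) (grnt : List (List String)) (grt : List (String × List String)) : Bool :=
  let r := csLoop sent grt grnt 0
  decide (r.1 ≠ [] ∧ r.2 = sent.length)

-- ===== PORT B =====

-- for i, w in enumerate(sent): cands = [s for s in cands if len(s) <= i or (s[i] in grt and w in grt[s[i]])]
def altLoop (grt : List (String × List String)) : List String → Nat → List (List String) → Bool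
  | [], _, cands => !cands.isEmpty
  | w :: ws, i, cands =>
    let cands' := cands.filter (fun s => decide (s.length ≤ i) ||
      (grt.any (fun q => q.1 == s.getD i "") && (pvLookup grt (s.getD i "")).contains w))
    if cands'.isEmpty then false else altLoop grt ws (i + 1) cands'

def check_sent_alt (sent : List String) (grnt : List (List String)) (grt : List (String × List String)) : Bool :=
  altLoop grt sent 0 grnt

-- ===== PRECONDITION & SPEC =====
def Spec_check_sent (sent : List String) (grnt : List (List String)) (grt : List (String × List String)) (out : Bool) : Prop := out = check_sent_alt sent grnt grt
instance (sent : List String) (grnt : List (List String)) (grt : List (String × List String)) (out : Bool) : Decidable (Spec_check_sent sent grnt grt out) := by unfold Spec_check_sent; infer_instance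

-- ===== CLAIM (what is proved, stated in full; the proofs are below) =====
def Claim_equal_check_sent : Prop := ∀ (sent : List String) (grnt : List (List String)) (grt : List (String × List String)), Dom_check_sent sent grnt grt → Spec_check_sent sent grnt grt (check_sent sent grnt grt)

-- ===== LEMMAS AND PROOFS =====

-- survival predicate: s is compatible with every remaining word
def Surv (sent : List String) (grt : List (String × List String)) (i : Nat) (s : List String) : Prop :=
  ∀ j, i ≤ j → j < sent.length → j < s.length → s.getD j "" ∈ find_w (sent.getD j "") grt

lemma mem_find_w (w x : String) (grt : List (String × List String)) :
    x ∈ find_w w grt ↔ ∃ p ∈ grt, p.1 = x ∧ w ∈ pvLookup grt p.1 := by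
  unfold find_w
  have h : ∀ (l : List (String × List String)) (acc : List String),
      x ∈ l.foldl (fun res p => if w ∈ pvLookup grt p.1 then res ++ [p.1] else res) acc ↔
        x ∈ acc ∨ ∃ p ∈ l, p.1 = x ∧ w ∈ pvLookup grt p.1 := by
    intro l
    induction l with
    | nil => simp
    | cons p rest ih =>
      intro acc
      simp only [List.foldl_cons]
      by_cases hp : w ∈ pvLookup grt p.1
      · rw [if_pos hp, ih]; simp; aesop
      · rw [if_neg hp, ih]; simp; aesop
  rw [h]; simp

-- the inner for-loop over temp_gr removing failing sequences computes a filter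
lemma step_filter (i : Nat) (start : List String) :
    ∀ (l pre : List (List String)), (∀ x ∈ pre, ¬ (i < x.length ∧ x.getD i "" ∉ start)) →
      l.foldl (fun acc s =>
          if i < s.length ∧ s.getD i "" ∉ start then (PySem.List.remove? acc s).getD acc else acc)
        (pre ++ l)
        = pre ++ l.filter (fun s => !decide (i < s.length ∧ s.getD i "" ∉ start)) := by
  intro l
  induction l with
  | nil => simp
  | cons x xs ih =>
    intro pre hpre
    simp only [List.foldl_cons]
    by_cases hx : i < x.length ∧ x.getD i "" ∉ start
    · rw [if_pos hx]
      have hmem : x ∈ pre ++ x :: xs := by simp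
      rw [PySem.List.remove?_eq_some_erase _ x hmem]
      have hnotpre : x ∉ pre := fun hc => hpre x hc hx
      have herase : (pre ++ x :: xs).erase x = pre ++ xs := by
        rw [List.erase_append_right _ hnotpre, List.erase_cons_head]
      simp only [Option.getD_some, herase, ih pre hpre]
      rw [List.filter_cons_of_neg (by rw [Bool.not_eq_true, Bool.not_eq_false']; exact decide_eq_true hx)]
    · rw [if_neg hx]
      have hpre' : ∀ y ∈ pre ++ [x], ¬ (i < y.length ∧ y.getD i "" ∉ start) := by
        intro y hy
        rcases List.mem_append.mp hy with h | h
        · exact hpre y h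
        · rw [List.mem_singleton] at h; subst h; exact hx
      have heq : pre ++ x :: xs = (pre ++ [x]) ++ xs := by simp
      rw [heq, ih (pre ++ [x]) hpre']
      rw [List.filter_cons_of_pos (by rw [Bool.not_eq_true']; exact decide_eq_false hx)]
      simp

lemma surv_step (sent : List String) (grt : List (String × List String)) (i : Nat)
    (hi : i < sent.length) (s : List String) :
    Surv sent grt i s ↔
      (¬ (i < s.length ∧ s.getD i "" ∉ find_w (sent.getD i "") grt) ∧ Surv sent grt (i + 1) s) := by
  constructor
  · intro h
    refine ⟨fun ⟨h1, h2⟩ => h2 (h i le_rfl hi h1), fun j hj hj2 hj3 => h j (by omega) hj2 hj3⟩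
  · rintro ⟨h1, h2⟩ j hj hj2 hj3
    rcases Nat.eq_or_lt_of_le hj with rfl | hlt
    · by_contra hc
      exact h1 ⟨hj3, hc⟩
    · exact h2 j (by omega) hj2 hj3

theorem csLoop_spec (sent : List String) (grt : List (String × List String))
    (tg : List (List String)) (i : Nat) (h : i ≤ sent.length) :
    ((csLoop sent grt tg i).1 ≠ [] ∧ (csLoop sent grt tg i).2 = sent.length) ↔
      ∃ s ∈ tg, Surv sent grt i s := by
  rw [csLoop]
  split
  · next hc =>
    obtain ⟨hne, hlt⟩ := hc
    rw [csLoop_spec sent grt _ (i + 1) (by omega)]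
    rw [show (tg.foldl (fun acc s =>
        if i < s.length ∧ s.getD i "" ∉ find_w (sent.getD i "") grt then
          (PySem.List.remove? acc s).getD acc else acc) tg)
      = tg.filter (fun s => !decide (i < s.length ∧ s.getD i "" ∉ find_w (sent.getD i "") grt))
      from by simpa using step_filter i (find_w (sent.getD i "") grt) tg [] (by simp)]
    constructor
    · rintro ⟨s, hs, hsurv⟩
      rw [List.mem_filter] at hs
      obtain ⟨hs1, hs2⟩ := hs
      simp only [Bool.not_eq_true', decide_eq_false_iff_not] at hs2
      exact ⟨s, hs1, (surv_step sent grt i hlt s).mpr ⟨hs2, hsurv⟩⟩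
    · rintro ⟨s, hs, hsurv⟩
      rw [surv_step sent grt i hlt s] at hsurv
      refine ⟨s, List.mem_filter.mpr ⟨hs, ?_⟩, hsurv.2⟩
      simp only [Bool.not_eq_true', decide_eq_false_iff_not]
      exact hsurv.1
  · next hc =>
    by_cases hne : tg = []
    · subst hne; simp
    · have hi : i = sent.length := by
        rcases Nat.lt_or_ge i sent.length with h1 | h2
        · exact absurd ⟨hne, h1⟩ hc
        · omega
      subst hi
      constructor
      · rintro ⟨h1, -⟩
        obtain ⟨s, hs⟩ := List.exists_mem_of_ne_nil tg hne
        exact ⟨s, hs, fun j hj hj2 _ => by omega⟩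
      · intro _
        exact ⟨hne, rfl⟩
termination_by sent.length - i

-- 's[i] in grt and w in grt[s[i]]' as a Prop
def pvHit (grt : List (String × List String)) (w x : String) : Prop :=
  (∃ p ∈ grt, p.1 = x) ∧ w ∈ pvLookup grt x

lemma find_w_hit (w x : String) (grt : List (String × List String)) :
    x ∈ find_w w grt ↔ pvHit grt w x := by
  rw [mem_find_w, pvHit]
  constructor
  · rintro ⟨p, hp, rfl, h2⟩
    exact ⟨⟨p, hp, rfl⟩, h2⟩
  · rintro ⟨⟨p, hp, rfl⟩, h2⟩
    exact ⟨p, hp, rfl, h2⟩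

lemma altLoop_spec (grt : List (String × List String)) :
    ∀ (ws : List String) (i : Nat) (cands : List (List String)),
      altLoop grt ws i cands = true ↔
        ∃ s ∈ cands, ∀ k, k < ws.length → k + i < s.length →
          pvHit grt (ws.getD k "") (s.getD (k + i) "") := by
  intro ws
  induction ws with
  | nil =>
    intro i cands
    simp only [altLoop, Bool.not_eq_true', List.isEmpty_eq_false_iff]
    constructor
    · intro h
      obtain ⟨s, hs⟩ := List.exists_mem_of_ne_nil cands (by simpa using h)
      exact ⟨s, hs, fun k hk => by simp at hk⟩
    · rintro ⟨s, hs, -⟩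
      intro hc; subst hc; simp at hs
  | cons w ws ih =>
    intro i cands
    simp only [altLoop]
    have hmemfil : ∀ s : List String,
        s ∈ cands.filter (fun s => decide (s.length ≤ i) ||
            (grt.any (fun q => q.1 == s.getD i "") && (pvLookup grt (s.getD i "")).contains w)) ↔
          s ∈ cands ∧ (s.length ≤ i ∨ pvHit grt w (s.getD i "")) := by
      intro s
      rw [List.mem_filter, pvHit]
      simp [List.any_eq_true]
    have hsplit : ∀ s : List String,
        ((s.length ≤ i ∨ pvHit grt w (s.getD i "")) ∧
          (∀ k, k < ws.length → k + (i + 1) < s.length →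
            pvHit grt (ws.getD k "") (s.getD (k + (i + 1)) ""))) ↔
          (∀ k, k < (w :: ws).length → k + i < s.length →
            pvHit grt ((w :: ws).getD k "") (s.getD (k + i) "")) := by
      intro s
      constructor
      · rintro ⟨h0, hrest⟩ k hk hk2
        match k with
        | 0 =>
          simp only [Nat.zero_add] at hk2 ⊢
          rcases h0 with h | h
          · omega
          · simpa using h
        | Nat.succ m =>
          have := hrest m (by simpa using hk) (by omega)
          simpa [Nat.succ_add, Nat.add_right_comm] using this
      · intro h
        refine ⟨?_, fun k hk hk2 => ?_⟩
        · by_cases hl : s.length ≤ i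
          · exact Or.inl hl
          · exact Or.inr (by simpa using h 0 (by simp) (by omega))
        · have := h (k + 1) (by simpa using hk) (by omega)
          simpa [Nat.succ_add, Nat.add_right_comm] using this
    split
    · next hempty =>
      rw [List.isEmpty_iff] at hempty
      constructor
      · intro h; exact absurd h (by simp)
      · rintro ⟨s, hs, hall⟩
        have : s ∈ cands.filter (fun s => decide (s.length ≤ i) ||
            (grt.any (fun q => q.1 == s.getD i "") && (pvLookup grt (s.getD i "")).contains w)) := by
          rw [hmemfil]
          exact ⟨hs, ((hsplit s).mpr hall).1⟩
        rw [hempty] at this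
        simp at this
    · next hempty =>
      rw [ih]
      constructor
      · rintro ⟨s, hs, hall⟩
        rw [hmemfil] at hs
        exact ⟨s, hs.1, (hsplit s).mp ⟨hs.2, hall⟩⟩
      · rintro ⟨s, hs, hall⟩
        have h2 := (hsplit s).mpr hall
        exact ⟨s, (hmemfil s).mpr ⟨hs, h2.1⟩, fun k hk hk2 => ((hsplit s).mpr hall).2 k hk hk2⟩

lemma alt_iff (sent : List String) (grnt : List (List String)) (grt : List (String × List String)) :
    check_sent_alt sent grnt grt = true ↔ ∃ s ∈ grnt, Surv sent grt 0 s := by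
  unfold check_sent_alt
  rw [altLoop_spec]
  unfold Surv
  constructor
  · rintro ⟨s, hs, h⟩
    refine ⟨s, hs, fun j _ hj2 hj3 => ?_⟩
    rw [find_w_hit]
    simpa using h j hj2 (by omega)
  · rintro ⟨s, hs, h⟩
    refine ⟨s, hs, fun k hk hk2 => ?_⟩
    have := h k (Nat.zero_le k) hk (by omega)
    rw [find_w_hit] at this
    simpa using this

-- ===== VERDICT (by name: the statement is the Claim_ definition above) =====
theorem check_sent_spec : Claim_equal_check_sent := by
  intro sent grnt grt _
  unfold Spec_check_sent check_sent
  rw [Bool.eq_iff_iff]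
  simp only [decide_eq_true_eq]
  rw [csLoop_spec sent grt grnt 0 (Nat.zero_le _), alt_iff]
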